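-- pv_equiv track=rewrite | github.com/AlexisVillarruel/calculadora-subnet | calcipv.py | highlight_network_and_borrowed_bits
-- ===== SOURCE A (Python) =====
-- def highlight_network_and_borrowed_bits(ip_bin, mask_bits):
--     # Resalta los bits de red y los bits prestados en binario
--     highlighted_ip = ""
--     for i, bit in enumerate(ip_bin.replace(".", "")):
--         if i < mask_bits:
--             # Resaltar los bits de red en verde
--             highlighted_ip += f'<span style="color: green;">{bit}</span>'
--         elif i < mask_bits + (8 - mask_bits % 8):
--             # Resaltar los bits prestados en azul
--             highlighted_ip += f'<span style="color: blue;">{bit}</span>'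
--         else:
--             # Los bits restantes no tienen resaltado
--             highlighted_ip += bit
--         if (i + 1) % 8 == 0 and i < len(ip_bin.replace(".", "")) - 1:
--             highlighted_ip += "."
--     return highlighted_ip
-- ===== SOURCE B (Python) =====
-- def highlight_network_and_borrowed_bits(ip_bin, mask_bits):
--     bits = ip_bin.replace(".", "")
--     n = len(bits)
--     green_end = max(0, min(mask_bits, n))
--     blue_end = max(green_end, min(mask_bits + (8 - mask_bits % 8), n))
--     formatted = (
--         ['<span style="color: green;">%s</span>' % c for c in bits[:green_end]]
--         + ['<span style="color: blue;">%s</span>' % c for c in bits[green_end:blue_end]]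
--         + list(bits[blue_end:])
--     )
--     chunks = []
--     i = 0
--     while i < len(formatted):
--         chunks.append(formatted[i:i + 8])
--         i += 8
--     return ".".join("".join(chunk) for chunk in chunks)
-- ===== Notes on version B (the rewrite author's own statement) =====
-- stated objective: faster
-- what changed: A classifies every bit by index tests inside one accumulating loop and recomputes the dot-stripped string (ip_bin.replace) on every iteration for its length test, making it quadratic; B strips once, precomputes the clamped green/blue boundaries, formats the three slices separately, then chunks the formatted pieces into groups of 8 joined with '.'.
import Mathlib
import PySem

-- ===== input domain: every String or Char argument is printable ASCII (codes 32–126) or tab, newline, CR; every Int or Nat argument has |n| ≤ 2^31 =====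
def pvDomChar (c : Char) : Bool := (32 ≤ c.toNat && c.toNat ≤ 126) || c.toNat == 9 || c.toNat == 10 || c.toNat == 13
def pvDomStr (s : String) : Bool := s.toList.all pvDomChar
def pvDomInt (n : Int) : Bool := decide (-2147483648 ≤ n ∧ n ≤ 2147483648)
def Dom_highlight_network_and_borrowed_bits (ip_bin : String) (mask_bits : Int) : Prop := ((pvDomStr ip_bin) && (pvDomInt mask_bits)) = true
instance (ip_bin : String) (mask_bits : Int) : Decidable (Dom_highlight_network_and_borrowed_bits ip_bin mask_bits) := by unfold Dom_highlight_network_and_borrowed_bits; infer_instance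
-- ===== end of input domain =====

-- B replaces A's per-bit index classification inside one accumulating loop (which recomputes the
-- dot-stripped string every iteration) by precomputed clamped boundaries with three slices, then
-- chunks the formatted pieces into groups of 8 joined by '.' (objective: faster, measured).

-- ===== PORT A =====
-- the two HTML wrappers (the f-strings of the Python)
def pvGreen (c : Char) : List Char := "<span style=\"color: green;\">".toList ++ [c] ++ "</span>".toList
def pvBlue (c : Char) : List Char := "<span style=\"color: blue;\">".toList ++ [c] ++ "</span>".toList

def highlight_network_and_borrowed_bits (ip_bin : String) (mask_bits : Int) : String :=
  let bits := (PySem.Str.replace ip_bin "." "").toList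
  String.ofList ((PySem.List.enumerate bits).foldl (fun acc p =>
    (acc ++ (if p.1 < mask_bits then pvGreen p.2
             else if p.1 < mask_bits + (8 - PySem.Int.mod mask_bits 8) then pvBlue p.2
             else [p.2])) ++
    (if PySem.Int.mod (p.1 + 1) 8 = 0 ∧ p.1 < (bits.length : Int) - 1 then ['.'] else [])) [])

-- ===== PORT B =====
-- Python's sep.join(parts), step for step
def pvJoin (sep : List Char) : List (List Char) → List Char
  | [] => []
  | [x] => x
  | x :: y :: rest => x ++ sep ++ pvJoin sep (y :: rest)

-- Source B's while-loop chunking by index; formatted[i:i+8] with 0 <= i is exactly (drop i).take 8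
def pvChunksGo (ss : List (List Char)) (i : Nat) : List (List (List Char)) :=
  if i < ss.length then ((ss.drop i).take 8) :: pvChunksGo ss (i + 8) else []
termination_by ss.length - i
decreasing_by omega

def highlight_network_and_borrowed_bits_alt (ip_bin : String) (mask_bits : Int) : String :=
  let bits := (PySem.Str.replace ip_bin "." "").toList
  let n := bits.length
  let g : Nat := (max 0 (min mask_bits (n : Int))).toNat
  let b : Nat := (max (g : Int) (min (mask_bits + (8 - PySem.Int.mod mask_bits 8)) (n : Int))).toNat
  let formatted := (bits.take g).map pvGreen ++ ((bits.drop g).take (b - g)).map pvBlue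
                   ++ (bits.drop b).map (fun c => [c])
  String.ofList (pvJoin ['.'] ((pvChunksGo formatted 0).map (fun ch => pvJoin [] ch)))

-- ===== PRECONDITION & SPEC =====
def Spec_highlight_network_and_borrowed_bits (ip_bin : String) (mask_bits : Int) (out : String) : Prop := out = highlight_network_and_borrowed_bits_alt ip_bin mask_bits
instance (ip_bin : String) (mask_bits : Int) (out : String) : Decidable (Spec_highlight_network_and_borrowed_bits ip_bin mask_bits out) := by unfold Spec_highlight_network_and_borrowed_bits; infer_instance

-- ===== CLAIM (what is proved, stated in full; the proofs are below) =====
def Claim_equal_highlight_network_and_borrowed_bits : Prop := ∀ (ip_bin : String) (mask_bits : Int), Dom_highlight_network_and_borrowed_bits ip_bin mask_bits → Spec_highlight_network_and_borrowed_bits ip_bin mask_bits (highlight_network_and_borrowed_bits ip_bin mask_bits)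

-- ===== LEMMAS AND PROOFS =====

-- proof-side view of the chunking: repeatedly split off the first 8 pieces
def pvChunksRec (ss : List (List Char)) : List (List (List Char)) :=
  match ss with
  | [] => []
  | x :: rest => ((x :: rest).take 8) :: pvChunksRec (rest.drop 7)
termination_by ss.length
decreasing_by simp

lemma pv_chunksRec_cons (x : List Char) (rest : List (List Char)) :
    pvChunksRec (x :: rest) = ((x :: rest).take 8) :: pvChunksRec ((x :: rest).drop 8) := by
  rw [pvChunksRec.eq_def]
  simp

lemma pv_chunksRec_nil : pvChunksRec [] = [] := by
  rw [pvChunksRec.eq_def]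

lemma pv_chunksGo_eq_rec (ss : List (List Char)) : ∀ (d i : Nat), ss.length - i ≤ d →
    pvChunksGo ss i = pvChunksRec (ss.drop i) := by
  intro d
  induction d with
  | zero =>
      intro i h
      rw [pvChunksGo.eq_def, if_neg (by omega), List.drop_eq_nil_of_le (by omega), pv_chunksRec_nil]
  | succ d ih =>
      intro i h
      by_cases hi : i < ss.length
      · rw [pvChunksGo.eq_def]; rw [if_pos hi]
        obtain ⟨z, zs, hz⟩ : ∃ z zs, ss.drop i = z :: zs := by
          cases hd : ss.drop i with
          | nil =>
              have hlen0 : (ss.drop i).length = ss.length - i := List.length_drop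
              rw [hd] at hlen0
              simp at hlen0
              omega
          | cons z zs => exact ⟨z, zs, rfl⟩
        conv_rhs => rw [hz, pv_chunksRec_cons, ← hz]
        rw [List.drop_drop]
        exact congrArg _ (ih (i + 8) (by omega))
      · rw [pvChunksGo.eq_def, if_neg hi, List.drop_eq_nil_of_le (by omega), pv_chunksRec_nil]

lemma pv_mod8 (x : Int) : PySem.Int.mod x 8 = x % 8 :=
  PySem.Int.mod_eq_emod_of_pos (by norm_num)

lemma pvJoin_nil_cons (x : List Char) (xs : List (List Char)) :
    pvJoin [] (x :: xs) = x ++ pvJoin [] xs := by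
  cases xs <;> simp [pvJoin]

lemma pv_foldl_flat {α : Type} (X Y : α → List Char) : ∀ (l : List α) (acc : List Char),
    l.foldl (fun a p => (a ++ X p) ++ Y p) acc = acc ++ l.flatMap (fun p => X p ++ Y p) := by
  intro l
  induction l with
  | nil => simp
  | cons x t ih => intro acc; simp [List.append_assoc, List.flatMap]

-- one formatted piece after another, a dot after every index i with (i+1) % 8 == 0 except the last
def pvEmit (n : Nat) : List (List Char) → Int → List Char
  | [], _ => []
  | s :: rest, i =>
      s ++ (if PySem.Int.mod (i + 1) 8 = 0 ∧ i < (n : Int) - 1 then ['.'] else [])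
        ++ pvEmit n rest (i + 1)

lemma pv_flat_enum_eq_emit (n : Nat) (fw : Int × Char → List Char) : ∀ (l : List Char) (i : Int),
    (PySem.List.enumerate l i).flatMap
      (fun p => fw p ++ (if PySem.Int.mod (p.1 + 1) 8 = 0 ∧ p.1 < (n : Int) - 1 then ['.'] else [])) =
    pvEmit n ((PySem.List.enumerate l i).map fw) i := by
  intro l
  induction l with
  | nil => intro i; simp [PySem.List.enumerate_nil, pvEmit]
  | cons c t ih =>
      intro i
      rw [PySem.List.enumerate_cons]
      simp only [List.flatMap_cons, List.map_cons, pvEmit, ih]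

lemma pv_map_enum (wrap : Char → List Char) (fw : Int × Char → List Char) : ∀ (l : List Char) (s : Int),
    (∀ (j : Nat), j < l.length → ∀ c, fw (s + j, c) = wrap c) →
    (PySem.List.enumerate l s).map fw = l.map wrap := by
  intro l
  induction l with
  | nil => intro s _; simp [PySem.List.enumerate_nil]
  | cons c t ih =>
      intro s h
      rw [PySem.List.enumerate_cons]
      simp only [List.map_cons]
      congr 1
      · have := h 0 (by simp) c
        simpa using this
      · apply ih
        intro j hj c
        have := h (j + 1) (by simp; omega) c
        rw [← this]
        congr 1
        push_cast
        ring_nf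

lemma pv_emit_append (n : Nat) : ∀ (s1 s2 : List (List Char)) (i : Int),
    pvEmit n (s1 ++ s2) i = pvEmit n s1 i ++ pvEmit n s2 (i + s1.length) := by
  intro s1
  induction s1 with
  | nil => intro s2 i; simp [pvEmit]
  | cons x t ih =>
      intro s2 i
      simp only [List.cons_append, pvEmit, ih, List.length_cons, List.append_assoc]
      congr 2
      push_cast
      ring_nf

lemma pv_emit_nodot (n : Nat) : ∀ (ss : List (List Char)) (i : Int),
    (∀ j : Nat, j < ss.length → ¬((i + j + 1) % 8 = 0 ∧ i + j < (n : Int) - 1)) →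
    pvEmit n ss i = pvJoin [] ss := by
  intro ss
  induction ss with
  | nil => intro i _; simp [pvEmit, pvJoin]
  | cons s rest ih =>
      intro i h
      rw [pvJoin_nil_cons]
      show s ++ _ ++ _ = _
      rw [if_neg (by
        rw [pv_mod8]
        have h0 := h 0 (by simp)
        intro hc
        exact h0 (by push_cast at hc ⊢; constructor <;> omega))]
      rw [ih (i + 1) (fun j hj hc => by
        refine h (j + 1) (by simp; omega) ?_
        push_cast at hc ⊢
        constructor <;> omega)]
      simp

lemma pv_emit_lastdot (n : Nat) : ∀ (ss : List (List Char)) (i : Int), ss ≠ [] →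
    (i + ss.length) % 8 = 0 → i + ss.length ≤ (n : Int) - 1 →
    (∀ j : Nat, j + 1 < ss.length → (i + j + 1) % 8 ≠ 0) →
    pvEmit n ss i = pvJoin [] ss ++ ['.'] := by
  intro ss
  induction ss with
  | nil => intro i h; exact absurd rfl h
  | cons s rest ih =>
      intro i _ h8 hlt hin
      cases rest with
      | nil =>
          show s ++ _ ++ _ = _
          rw [if_pos (by
            rw [pv_mod8]
            simp at h8 hlt
            constructor <;> omega)]
          simp [pvEmit, pvJoin]
      | cons y t =>
          rw [pvJoin_nil_cons]
          show s ++ _ ++ _ = _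
          rw [if_neg (by
            rw [pv_mod8]
            have h0 := hin 0 (by simp)
            intro hc
            apply h0
            push_cast at hc ⊢
            omega)]
          rw [ih (i + 1) (by simp)
            (by simp only [List.length_cons] at h8 ⊢; push_cast at h8 ⊢; omega)
            (by simp only [List.length_cons] at hlt ⊢; push_cast at hlt ⊢; omega)
            (fun j hj => by
              have := hin (j + 1) (by simp at hj ⊢; omega)
              intro hc
              apply this
              push_cast at hc ⊢
              omega)]
          simp [List.append_assoc]

lemma pvJoin_cons_cons (sep a b : List Char) (l : List (List Char)) :
    pvJoin sep (a :: b :: l) = a ++ sep ++ pvJoin sep (b :: l) := rfl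

lemma pv_emit_chunks (n : Nat) : ∀ (m : Nat) (ss : List (List Char)) (k : Nat),
    ss.length ≤ m → n = 8 * k + ss.length →
    pvEmit n ss ((8 * k : Nat) : Int) = pvJoin ['.'] ((pvChunksRec ss).map (fun ch => pvJoin [] ch)) := by
  intro m
  induction m with
  | zero =>
      intro ss k h1 _
      have : ss = [] := List.eq_nil_of_length_eq_zero (by omega)
      subst this
      simp [pvEmit, pv_chunksRec_nil, pvJoin]
  | succ m ih =>
      intro ss k h1 h2
      match ss with
      | [] => simp [pvEmit, pv_chunksRec_nil, pvJoin]
      | x :: rest =>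
          have hL : (x :: rest).length = rest.length + 1 := by simp
          by_cases h8 : (x :: rest).length ≤ 8
          · have hdrop : (x :: rest).drop 8 = [] := List.drop_eq_nil_of_le h8
            rw [pv_chunksRec_cons, hdrop, List.take_of_length_le h8, pv_chunksRec_nil]
            simp only [List.map_cons, List.map_nil]
            rw [show pvJoin ['.'] [pvJoin [] (x :: rest)] = pvJoin [] (x :: rest) from rfl]
            apply pv_emit_nodot
            intro j hj hc
            obtain ⟨hc1, hc2⟩ := hc
            push_cast at hc1 hc2
            omega
          · have hlen : 8 < (x :: rest).length := by omega
            have hsplit : x :: rest = (x :: rest).take 8 ++ (x :: rest).drop 8 :=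
              (List.take_append_drop _ _).symm
            have htake : ((x :: rest).take 8).length = 8 := by
              rw [List.length_take]; omega
            conv_lhs => rw [hsplit]
            rw [pv_emit_append, htake]
            have hdn : ((x :: rest).drop 8).length = (x :: rest).length - 8 := by simp
            obtain ⟨z, zs, hzz⟩ : ∃ z zs, (x :: rest).drop 8 = z :: zs := by
              cases hd : (x :: rest).drop 8 with
              | nil => rw [hd] at hdn; simp at hdn; omega
              | cons z zs => exact ⟨z, zs, rfl⟩
            have hfirst : pvEmit n ((x :: rest).take 8) ((8 * k : Nat) : Int) =
                pvJoin [] ((x :: rest).take 8) ++ ['.'] := by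
              apply pv_emit_lastdot
              · intro hnil; rw [hnil] at htake; simp at htake
              · rw [htake]; push_cast; omega
              · rw [htake]; push_cast; omega
              · intro j hj hc
                rw [htake] at hj
                push_cast at hc
                omega
            have hsecond : pvEmit n ((x :: rest).drop 8) (((8 * k : Nat) : Int) + ((8 : Nat) : Int)) =
                pvJoin ['.'] ((pvChunksRec ((x :: rest).drop 8)).map (fun ch => pvJoin [] ch)) := by
              have hcast : (((8 * k : Nat) : Int) + ((8 : Nat) : Int)) = ((8 * (k + 1) : Nat) : Int) := by
                push_cast; ring
              rw [hcast]
              apply ih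
              · rw [hdn]; omega
              · rw [hdn]; omega
            rw [hfirst, hsecond, pv_chunksRec_cons x rest, hzz, pv_chunksRec_cons z zs]
            simp only [List.map_cons]
            rw [pvJoin_cons_cons]

-- ===== VERDICT (by name: the statement is the Claim_ definition above) =====
theorem highlight_network_and_borrowed_bits_spec : Claim_equal_highlight_network_and_borrowed_bits := by
  intro ip ms _
  unfold Spec_highlight_network_and_borrowed_bits
  simp only [highlight_network_and_borrowed_bits, highlight_network_and_borrowed_bits_alt]
  generalize (PySem.Str.replace ip "." "").toList = L
  refine congrArg String.ofList ?_
  rw [pv_foldl_flat]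
  rw [List.nil_append]
  rw [pv_flat_enum_eq_emit (L.length)
    (fun p => if p.1 < ms then pvGreen p.2
              else if p.1 < ms + (8 - PySem.Int.mod ms 8) then pvBlue p.2 else [p.2]) L 0]
  rw [pv_mod8]
  generalize hg : (max 0 (min ms (L.length : Int))).toNat = g
  generalize hb : (max (g : Int) (min (ms + (8 - ms % 8)) (L.length : Int))).toNat = b
  have hgb : g ≤ b := by omega
  have hbn : b ≤ L.length := by omega
  have hlt1 : (L.take g).length = g := by rw [List.length_take]; omega
  have hlt2 : ((L.drop g).take (b - g)).length = b - g := by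
    rw [List.length_take, List.length_drop]; omega
  have hsplit : L = L.take g ++ ((L.drop g).take (b - g) ++ L.drop b) := by
    conv_lhs => rw [← List.take_append_drop g L]
    congr 1
    conv_lhs => rw [← List.take_append_drop (b - g) (L.drop g)]
    congr 1
    rw [List.drop_drop]
    congr 1
    omega
  have hmap : (PySem.List.enumerate L 0).map
      (fun p => if p.1 < ms then pvGreen p.2
                else if p.1 < ms + (8 - ms % 8) then pvBlue p.2 else [p.2]) =
      (L.take g).map pvGreen ++ (((L.drop g).take (b - g)).map pvBlue
        ++ (L.drop b).map (fun c => [c])) := by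
    conv_lhs => rw [hsplit]
    rw [PySem.List.enumerate_append, PySem.List.enumerate_append, List.map_append,
      List.map_append, hlt1, hlt2]
    congr 1
    · apply pv_map_enum
      intro j hj c
      rw [hlt1] at hj
      show (if ((0 : Int) + j < ms) then pvGreen c
            else if ((0 : Int) + j < ms + (8 - ms % 8)) then pvBlue c else [c]) = _
      rw [if_pos (by omega)]
    congr 1
    · apply pv_map_enum
      intro j hj c
      rw [hlt2] at hj
      show (if ((0 : Int) + g + j < ms) then pvGreen c
            else if ((0 : Int) + g + j < ms + (8 - ms % 8)) then pvBlue c else [c]) = _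
      rw [if_neg (by omega), if_pos (by omega)]
    · apply pv_map_enum
      intro j hj c
      rw [List.length_drop] at hj
      show (if ((0 : Int) + g + (b - g : Nat) + j < ms) then pvGreen c
            else if ((0 : Int) + g + (b - g : Nat) + j < ms + (8 - ms % 8)) then pvBlue c
            else [c]) = _
      rw [if_neg (by omega), if_neg (by omega)]
  rw [← List.append_assoc] at hmap
  rw [hmap]
  have hlenF : (((L.take g).map pvGreen ++ ((L.drop g).take (b - g)).map pvBlue)
      ++ (L.drop b).map (fun c => [c])).length = L.length := by
    simp only [List.length_append, List.length_map, hlt1, hlt2, List.length_drop]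
    omega
  have hmain := pv_emit_chunks L.length
    ((((L.take g).map pvGreen ++ ((L.drop g).take (b - g)).map pvBlue)
      ++ (L.drop b).map (fun c => [c])).length)
    (((L.take g).map pvGreen ++ ((L.drop g).take (b - g)).map pvBlue)
      ++ (L.drop b).map (fun c => [c])) 0 (le_refl _) (by rw [hlenF]; omega)
  rw [show ((8 * 0 : Nat) : Int) = (0 : Int) by norm_num] at hmain
  rw [hmain, pv_chunksGo_eq_rec _ _ 0 (le_refl _), List.drop_zero]
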